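-- pv_equiv track=rewrite | github.com/WheatonCS/Lexos | lexos/models/rolling_windows_model.py | _get_rolling_window_from_list
-- ===== SOURCE A (Python) =====
-- from typing import NamedTuple, Optional, List, Callable, Dict
--
-- window_str = List[str]
--
-- def _get_rolling_window_from_list(input_list: List[str],
--                                   window_size: int) -> window_str:
--     """Get the rolling window from the list of terms.
--
--     :param input_list: A list of terms (word, char or line),
--         depends on the window type (word and line are with endings).
--     :param window_size: The size of the window (number of terms in window).
--     :return: An array of strings, each element is a window.
--     """
--     def _get_next_window(window: str, last_str: str, next_str: str) -> str:
--         """Roll the window to the next.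
--
--         Remove the first item in current window and append the upcoming
--         next item to roll the window.
--         :param window: The current window.
--         :param last_str: The first item at the front of the window.
--         :param next_str: The next item the window will include.
--         :return: The next window.
--         """
--         # Remove the last word and append next word at the end.
--         return "".join([window.replace(last_str, "", 1), next_str])
--
--     # Get the first window.
--     roll_window = "".join(input_list[: window_size])
--
--     # Create a list and hold the first window.
--     window_list = [roll_window]
--
--     # Roll over all possible windows and append it to the list.
--     for index, next_item in enumerate(input_list[window_size:]):
--         # Get next window.
--         roll_window = _get_next_window(window=roll_window,
--                                        last_str=input_list[index],
--                                        next_str=next_item)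
--         # Append to the list.
--         window_list.append(roll_window)
--
--     # Get the rolling list, should be a array of str.
--     return window_list
-- ===== SOURCE B (Python) =====
-- from typing import List
--
-- window_str = List[str]
--
-- def _get_rolling_window_from_list(input_list: List[str],
--                                   window_size: int) -> window_str:
--     """Get the rolling window from the list of terms (slice-based)."""
--     n = len(input_list)
--     count = max(1, n - window_size + 1)
--     return ["".join(input_list[i:i + window_size]) for i in range(count)]
-- ===== Notes on version B (the rewrite author's own statement) =====
-- stated objective: simpler
-- what changed: Replaces the incrementally-rolled window (string replace of the departing item + append of the next) with a direct comprehension that joins each window slice input_list[i:i+window_size] independently, for count = max(1, n - window_size + 1) windows.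
-- outside the precondition, e.g. on _get_rolling_window_from_list(['a'], 0): A returns ['', 'a'], B returns ['', '']; on _get_rolling_window_from_list(['a', 'b'], -1): A returns ['a', 'b'], B returns ['a', '', '', '']
import Mathlib
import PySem

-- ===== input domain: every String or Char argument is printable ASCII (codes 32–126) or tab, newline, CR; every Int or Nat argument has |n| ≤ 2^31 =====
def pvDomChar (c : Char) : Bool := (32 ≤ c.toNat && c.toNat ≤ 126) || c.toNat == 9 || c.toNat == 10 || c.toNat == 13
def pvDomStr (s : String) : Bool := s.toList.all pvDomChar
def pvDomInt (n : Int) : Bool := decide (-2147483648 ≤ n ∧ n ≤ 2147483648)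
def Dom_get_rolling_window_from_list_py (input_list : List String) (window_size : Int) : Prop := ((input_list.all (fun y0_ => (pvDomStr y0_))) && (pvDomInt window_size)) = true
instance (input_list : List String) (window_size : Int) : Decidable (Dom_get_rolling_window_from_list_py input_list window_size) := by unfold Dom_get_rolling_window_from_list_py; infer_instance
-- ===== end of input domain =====

-- B replaces A's incrementally-rolled window (replace the departing item, append the next)
-- with an independent join of each slice input_list[i:i+window_size]; objective: simpler.

-- ===== PORT A =====
-- Python's s.replace(old, "", 1) (count-limited replace is not a PySem primitive): hand port,
-- exact on all strings — removes the leftmost occurrence of old, no-op when absent or old = "".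
def pvReplaceOnceChars : List Char → List Char → List Char
  | [], _ => []
  | c :: rest, old =>
      if old.isPrefixOf (c :: rest) then (c :: rest).drop old.length
      else c :: pvReplaceOnceChars rest old

def pvReplaceOnce (s old : String) : String := String.ofList (pvReplaceOnceChars s.toList old.toList)

-- _get_next_window: "".join([window.replace(last_str, "", 1), next_str])
def pvNextWindow (window last_str next_str : String) : String :=
  PySem.Str.join "" [pvReplaceOnce window last_str, next_str]

-- the 'for index, next_item in enumerate(input_list[window_size:])' loop
-- (input_list[index] as pyGetD with default "": index is always in range when window_size ≥ 1)
def pvLoopA (input_list : List String) : List (Int × String) → String → List String → List String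
  | [], _, window_list => window_list
  | (index, next_item) :: rest, roll_window, window_list =>
      let w := pvNextWindow roll_window (PySem.List.pyGetD input_list index "") next_item
      pvLoopA input_list rest w (window_list ++ [w])

def get_rolling_window_from_list_py (input_list : List String) (window_size : Int) : List String :=
  let roll_window := PySem.Str.join "" (PySem.List.slice input_list none (some window_size))
  pvLoopA input_list
    (PySem.List.enumerate (PySem.List.slice input_list (some window_size) none) 0)
    roll_window [roll_window]

-- ===== PORT B =====
def get_rolling_window_from_list_py_alt (input_list : List String) (window_size : Int) : List String :=
  let n : Int := PySem.List.len input_list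
  let count : Int := max 1 (n - window_size + 1)
  (PySem.List.pyRange 0 count 1).map
    (fun i => PySem.Str.join "" (PySem.List.slice input_list (some i) (some (i + window_size))))

-- ===== PRECONDITION & SPEC =====
-- Pre_ excludes window_size ≤ 0, outside the natural domain (a window must hold at least one
-- term): there A still returns, but its value is an artefact of rolling via replace on an
-- empty initial window, which no slice-based reading of the task reproduces.
def Pre_get_rolling_window_from_list_py (input_list : List String) (window_size : Int) : Prop :=
  1 ≤ window_size
instance (input_list : List String) (window_size : Int) : Decidable (Pre_get_rolling_window_from_list_py input_list window_size) := by unfold Pre_get_rolling_window_from_list_py; infer_instance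

def pvWitness_get_rolling_window_from_list_py : List String × Int := (["ab", "c", "d"], 2)

def Spec_get_rolling_window_from_list_py (input_list : List String) (window_size : Int) (out : List String) : Prop := out = get_rolling_window_from_list_py_alt input_list window_size
instance (input_list : List String) (window_size : Int) (out : List String) : Decidable (Spec_get_rolling_window_from_list_py input_list window_size out) := by unfold Spec_get_rolling_window_from_list_py; infer_instance

-- ===== CLAIM (what is proved, stated in full; the proofs are below) =====
def Claim_equal_get_rolling_window_from_list_py : Prop := ∀ (input_list : List String) (window_size : Int), Dom_get_rolling_window_from_list_py input_list window_size → Pre_get_rolling_window_from_list_py input_list window_size → Spec_get_rolling_window_from_list_py input_list window_size (get_rolling_window_from_list_py input_list window_size)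

-- ===== LEMMAS AND PROOFS =====

-- the window starting at position i, as B computes it
def pvWin (xs : List String) (w i : Nat) : String :=
  PySem.Str.join "" ((xs.drop i).take w)

theorem pvJoinNilFlatten (xss : List (List Char)) : PySem.Chars.join [] xss = xss.flatten := by
  induction xss with
  | nil => simp [PySem.Chars.join_nil]
  | cons p rest ih =>
    cases rest with
    | nil => simp [PySem.Chars.join, List.intercalate]
    | cons q r => rw [PySem.Chars.join_cons_cons]; simp_all

theorem pvToListJoin (parts : List String) :
    (PySem.Str.join "" parts).toList = (parts.map String.toList).flatten := by
  rw [PySem.Str.toList_join]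
  exact pvJoinNilFlatten _

theorem pvReplaceOnce_prefix (l r : List Char) : pvReplaceOnceChars (l ++ r) l = r := by
  cases l with
  | nil =>
    cases r with
    | nil => rfl
    | cons c rc => simp [pvReplaceOnceChars, List.isPrefixOf]
  | cons c lc =>
    have hpre : (c :: lc).isPrefixOf ((c :: lc) ++ r) = true := by
      simp [List.isPrefixOf_iff_prefix]
    simp only [List.cons_append] at hpre ⊢
    rw [pvReplaceOnceChars, if_pos hpre]
    simp

theorem pvStep (xs : List String) (w' k : Nat) (h : k + (w' + 1) < xs.length) :
    pvNextWindow (pvWin xs (w' + 1) k) (xs[k]'(by omega)) (xs[k + (w' + 1)]'h)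
      = pvWin xs (w' + 1) (k + 1) := by
  apply String.toList_inj.mp
  have hk : k < xs.length := by omega
  have hdrop : xs.drop k = xs[k] :: xs.drop (k + 1) := List.drop_eq_getElem_cons hk
  have hT : (pvWin xs (w' + 1) k).toList
      = xs[k].toList ++ (((xs.drop (k + 1)).take w').map String.toList).flatten := by
    simp only [pvWin, pvToListJoin, hdrop, List.take_succ_cons, List.map_cons, List.flatten_cons]
  have htake : (xs.drop (k + 1)).take (w' + 1)
      = (xs.drop (k + 1)).take w' ++ [xs[k + (w' + 1)]'h] := by
    rw [List.take_add_one]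
    have hlt : w' < (xs.drop (k + 1)).length := by simp; omega
    rw [List.getElem?_eq_getElem hlt]
    simp [List.getElem_drop]
    congr 1
    omega
  simp only [pvNextWindow, pvToListJoin, pvReplaceOnce, List.map_cons, List.map_nil,
    List.flatten_cons, List.flatten_nil, List.append_nil, String.toList_ofList]
  rw [hT, pvReplaceOnce_prefix]
  conv_rhs => rw [pvWin, pvToListJoin, htake]
  simp only [List.map_append, List.flatten_append, List.map_cons, List.map_nil,
    List.flatten_cons, List.flatten_nil, List.append_nil]

theorem pvLoopA_spec (xs : List String) (w' : Nat) :
    ∀ (m k : Nat) (acc : List String), xs.length - (k + (w' + 1)) = m →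
      pvLoopA xs (PySem.List.enumerate (xs.drop (k + (w' + 1))) (k : Int)) (pvWin xs (w' + 1) k) acc
        = acc ++ (List.range' (k + 1) m).map (pvWin xs (w' + 1)) := by
  intro m
  induction m with
  | zero =>
    intro k acc hm
    have : xs.drop (k + (w' + 1)) = [] := by
      apply List.drop_eq_nil_of_le; omega
    simp [this, pvLoopA]
  | succ m ih =>
    intro k acc hm
    have hlt : k + (w' + 1) < xs.length := by omega
    have hdrop : xs.drop (k + (w' + 1)) = xs[k + (w' + 1)]'hlt :: xs.drop (k + (w' + 1) + 1) :=
      List.drop_eq_getElem_cons hlt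
    rw [hdrop, PySem.List.enumerate_cons, pvLoopA]
    have hget : PySem.List.pyGetD xs (k : Int) "" = xs[k]'(by omega) := by
      rw [PySem.List.pyGetD_natCast]
      exact List.getD_eq_getElem _ _ (by omega)
    rw [hget, pvStep xs w' k hlt]
    have harg : xs.drop (k + (w' + 1) + 1) = xs.drop ((k + 1) + (w' + 1)) := by
      congr 1; omega
    have hcast : (k : Int) + 1 = ((k + 1 : Nat) : Int) := by push_cast; ring
    rw [harg, hcast, ih (k + 1) (acc ++ [pvWin xs (w' + 1) (k + 1)]) (by omega)]
    rw [List.append_assoc, List.range'_succ, List.map_cons]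
    rfl

-- ===== VERDICT (by name: the statement is the Claim_ definition above) =====
theorem get_rolling_window_from_list_py_spec : Claim_equal_get_rolling_window_from_list_py := by
  intro xs ws _ hpre
  unfold Spec_get_rolling_window_from_list_py
  obtain ⟨w', hw⟩ : ∃ w' : Nat, ws = ((w' + 1 : Nat) : Int) :=
    ⟨(ws.toNat - 1), by unfold Pre_get_rolling_window_from_list_py at hpre; omega⟩
  subst hw
  set w : Nat := w' + 1 with hwdef
  have hBdef : get_rolling_window_from_list_py_alt xs ((w : Nat) : Int)
      = (PySem.List.pyRange 0 (max 1 ((PySem.List.len xs) - ((w : Nat) : Int) + 1)) 1).map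
          (fun i => PySem.Str.join "" (PySem.List.slice xs (some i) (some (i + ((w : Nat) : Int))))) := rfl
  rw [hBdef]
  unfold get_rolling_window_from_list_py
  rw [PySem.List.slice_to_natCast, PySem.List.slice_from_natCast]
  have hfirst : PySem.Str.join "" (xs.take w) = pvWin xs w 0 := by simp [pvWin]
  by_cases hle : w ≤ xs.length
  · -- at least one window position: A's loop yields windows 1 .. n-w after the first
    have hA := pvLoopA_spec xs w' (xs.length - w) 0 [pvWin xs w 0] (by omega)
    simp only [Nat.zero_add, Nat.cast_zero] at hA
    rw [hfirst, hA]
    have hcount : max 1 ((PySem.List.len xs) - ((w : Nat) : Int) + 1)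
        = ((xs.length - w + 1 : Nat) : Int) := by
      rw [PySem.List.len_eq]; push_cast; omega
    rw [hcount, PySem.List.pyRange_zero_natCast, List.map_map]
    have hfun : ((fun i => PySem.Str.join "" (PySem.List.slice xs (some i) (some (i + ((w : Nat) : Int))))) ∘ (fun j : Nat => (j : Int)))
        = fun j : Nat => pvWin xs w j := by
      funext j
      simp only [Function.comp]
      rw [PySem.List.slice_natCast_add]
      rfl
    rw [hfun]
    rw [show List.range (xs.length - w + 1) = List.range' 0 (xs.length - w + 1) from List.range_eq_range',
        List.range'_succ, List.map_cons]
    simp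
    intro a _ _
    rfl
  · -- n < w: the loop body never runs, a single full-join window on both sides
    have hdrop : xs.drop w = [] := List.drop_eq_nil_of_le (by omega)
    rw [hdrop]
    simp only [PySem.List.enumerate, pvLoopA]
    have hcount : max 1 ((PySem.List.len xs) - ((w : Nat) : Int) + 1) = 1 := by
      rw [PySem.List.len_eq]; omega
    rw [hcount]
    rw [show PySem.List.pyRange 0 1 1 = [(0 : Int)] from by decide]
    simp only [List.map_cons, List.map_nil]
    rw [hfirst]
    rw [show ((0 : Int) + ((w : Nat) : Int)) = ((w : Nat) : Int) from by ring]
    rw [PySem.List.slice_zero_start, PySem.List.slice_to_natCast, hfirst]
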